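-- pv_equiv track=rewrite | github.com/jollyxenon/UndergraduateStudy | GEHA1158/Assignment/bibliometric_analysis.py | extract_cnki_keywords
-- ===== SOURCE A (Python) =====
-- def extract_cnki_keywords(records):
--     """从 CNKI 记录提取关键词 (K1)"""
--     keywords = []
--     for r in records:
--         k1 = r.get('K1', '')
--         if k1:
--             kws = [k.strip() for k in k1.split(';') if k.strip()]
--             keywords.extend(kws)
--     return keywords
-- ===== SOURCE B (Python) =====
-- def extract_cnki_keywords(records):
--     """从 CNKI 记录提取关键词 (K1)"""
--     def tokens(s):
--         cur = []
--         for ch in s: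
--             if ch == ';':
--                 t = ''.join(cur).strip()
--                 if t:
--                     yield t
--                 cur = []
--             else:
--                 cur.append(ch)
--         t = ''.join(cur).strip()
--         if t:
--             yield t
--     return [t for r in records for t in tokens(r.get('K1', ''))]
-- ===== Notes on version B (the rewrite author's own statement) =====
-- stated objective: alternative
-- what changed: B replaces A's split(';')-then-strip-then-filter pipeline per record with a single character-level scanner that builds each token in an accumulator and emits it (stripped, if non-empty) at each ';' boundary and at end of string, flattened by one comprehension.
import Mathlib
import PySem

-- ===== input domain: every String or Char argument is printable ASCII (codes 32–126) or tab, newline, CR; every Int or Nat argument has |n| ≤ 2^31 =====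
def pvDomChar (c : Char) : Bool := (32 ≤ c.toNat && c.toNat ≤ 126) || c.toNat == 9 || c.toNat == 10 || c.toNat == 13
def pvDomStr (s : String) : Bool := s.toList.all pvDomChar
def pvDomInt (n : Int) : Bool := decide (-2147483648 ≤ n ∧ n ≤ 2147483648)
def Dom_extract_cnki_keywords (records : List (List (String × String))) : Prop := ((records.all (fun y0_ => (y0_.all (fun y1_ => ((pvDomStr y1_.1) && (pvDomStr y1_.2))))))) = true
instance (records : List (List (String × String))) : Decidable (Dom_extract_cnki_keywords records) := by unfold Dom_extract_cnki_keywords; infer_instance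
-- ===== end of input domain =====

-- B replaces A's per-record split(';')/strip/filter pipeline by a single character-level scanner
-- that accumulates the current token and emits it (stripped, if non-empty) at each ';' boundary
-- and at end of string; objective: alternative (same cost, different algorithm).

-- ===== PORT A =====
-- keywords accumulator; per record: k1 = r.get('K1',''); if k1: extend with stripped non-empty pieces of k1.split(';')
def extract_cnki_keywords (records : List (List (String × String))) : List String :=
  records.foldl (fun keywords r =>
    let k1 := PySem.Dict.getD (PySem.Dict.mk r) "K1" ""
    if k1 ≠ "" then
      let kws := (((PySem.Chars.splitOn k1.toList [';']).map PySem.Chars.strip).filter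
        (fun t => t ≠ [])).map String.ofList
      keywords ++ kws
    else keywords) []

-- ===== PORT B =====
-- the generator tokens(s): cur is the (reversed) accumulator of current-token characters;
-- at ';' and at end of string, yield ''.join(cur).strip() if truthy
def pvScanTokens : List Char → List Char → List String
  | [], cur =>
      let t := PySem.Chars.strip cur.reverse
      if t ≠ [] then [String.ofList t] else []
  | ch :: rest, cur =>
      if ch = ';' then
        let t := PySem.Chars.strip cur.reverse
        (if t ≠ [] then [String.ofList t] else []) ++ pvScanTokens rest []
      else
        pvScanTokens rest (ch :: cur)

-- [t for r in records for t in tokens(r.get('K1',''))]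
def extract_cnki_keywords_alt : List (List (String × String)) → List String
  | [] => []
  | r :: rs =>
      pvScanTokens (PySem.Dict.getD (PySem.Dict.mk r) "K1" "").toList []
        ++ extract_cnki_keywords_alt rs

-- ===== PRECONDITION & SPEC =====
def Spec_extract_cnki_keywords (records : List (List (String × String))) (out : List String) : Prop := out = extract_cnki_keywords_alt records
instance (records : List (List (String × String))) (out : List String) : Decidable (Spec_extract_cnki_keywords records out) := by unfold Spec_extract_cnki_keywords; infer_instance

-- ===== CLAIM (what is proved, stated in full; the proofs are below) =====
def Claim_equal_extract_cnki_keywords : Prop := ∀ (records : List (List (String × String))), Dom_extract_cnki_keywords records → Spec_extract_cnki_keywords records (extract_cnki_keywords records)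

-- ===== LEMMAS AND PROOFS =====

-- PySem.Chars.splitOn with a one-character separator is Mathlib's List.splitOn
theorem pv_go_spec (c : Char) (fuel : Nat) (l cur : List Char) (acc : List (List Char))
    (h : l.length ≤ fuel) :
    PySem.Chars.splitOn.go [c] fuel l cur acc
      = acc.reverse ++ List.modifyHead (fun x => cur.reverse ++ x) (List.splitOn c l) := by
  induction fuel generalizing l cur acc with
  | zero =>
    have hl : l = [] := List.length_eq_zero_iff.mp (Nat.le_zero.mp h)
    subst hl
    rw [PySem.Chars.splitOn.go.eq_def]
    simp [List.splitOn, List.splitOnP_nil]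
  | succ fuel ih =>
    cases l with
    | nil =>
      rw [PySem.Chars.splitOn.go.eq_def]
      simp [List.splitOn, List.splitOnP_nil]
    | cons a rest =>
      rw [PySem.Chars.splitOn.go.eq_def]
      simp only []
      by_cases hc : c = a
      · subst hc
        have hp : List.isPrefixOf [c] (c :: rest) = true := by
          simp [List.isPrefixOf]
        rw [if_pos hp]
        have := ih rest [] (cur.reverse :: acc) (by simpa using Nat.le_of_succ_le_succ h)
        simp only [List.length_singleton, List.drop_succ_cons, List.drop_zero] at this ⊢
        rw [this]
        have hs : List.splitOn c (c :: rest) = [] :: List.splitOn c rest := by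
          simp [List.splitOn, List.splitOnP_cons]
        rw [hs]
        have hne := List.splitOnP_ne_nil (fun x => x == c) rest
        cases h2 : List.splitOn c rest with
        | nil => exact absurd (by simpa [List.splitOn] using h2) hne
        | cons x xs => simp [List.modifyHead]
      · have hp : List.isPrefixOf [c] (a :: rest) = false := by
          simp [List.isPrefixOf]
          exact hc
        rw [if_neg (by simp [hp])]
        have := ih rest (a :: cur) acc (by simpa using Nat.le_of_succ_le_succ h)
        rw [this]
        have hs : List.splitOn c (a :: rest) = List.modifyHead (List.cons a) (List.splitOn c rest) := by
          simp only [List.splitOn, List.splitOnP_cons]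
          rw [if_neg (by simp; exact fun hh => hc hh.symm)]
        rw [hs, List.modifyHead_modifyHead]
        cases h2 : List.splitOn c rest with
        | nil => rfl
        | cons x xs => simp [List.modifyHead]

theorem pv_splitOn_eq (c : Char) (l : List Char) :
    PySem.Chars.splitOn l [c] = List.splitOn c l := by
  unfold PySem.Chars.splitOn
  rw [pv_go_spec c (l.length + 1) l [] [] (Nat.le_succ _)]
  cases h : List.splitOn c l with
  | nil => exact absurd h (by simp [List.splitOn, List.splitOnP_ne_nil])
  | cons x xs => simp [List.modifyHead]

-- the Char-level token extraction A performs per record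
def pvToks (l : List Char) : List (List Char) :=
  ((List.splitOn ';' l).map PySem.Chars.strip).filter (fun t => t ≠ [])

theorem pvToks_nil : pvToks [] = [] := by decide

theorem pv_modifyHead_append {α : Type} (f : α → α) (l m : List α) (h : l ≠ []) :
    List.modifyHead f (l ++ m) = List.modifyHead f l ++ m := by
  cases l with
  | nil => exact absurd rfl h
  | cons x xs => simp [List.modifyHead]

theorem pv_splitOnP_sep_append (p : Char → Bool) (x : Char) (hx : p x = true) (a b : List Char) :
    List.splitOnP p (a ++ x :: b) = List.splitOnP p a ++ List.splitOnP p b := by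
  induction a with
  | nil => simp [List.splitOnP_cons, hx, List.splitOnP_nil]
  | cons y ys ih =>
    by_cases hy : p y = true
    · simp [List.splitOnP_cons, hy, ih]
    · simp only [List.cons_append, List.splitOnP_cons, hy, Bool.false_eq_true, if_false, ih]
      rw [pv_modifyHead_append _ _ _ (List.splitOnP_ne_nil p ys)]

theorem pvToks_sep_append (a b : List Char) :
    pvToks (a ++ ';' :: b) = pvToks a ++ pvToks b := by
  unfold pvToks
  rw [show List.splitOn ';' (a ++ ';' :: b) = List.splitOn ';' a ++ List.splitOn ';' b from
    pv_splitOnP_sep_append _ ';' (by simp) a b]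
  simp [List.filter_append]

theorem pv_splitOn_no_sep (l : List Char) (h : ';' ∉ l) : List.splitOn ';' l = [l] := by
  induction l with
  | nil => simp [List.splitOn, List.splitOnP_nil]
  | cons x xs ih =>
    have hx : x ≠ ';' := fun hh => h (hh ▸ List.mem_cons_self)
    have := ih (fun hm => h (List.mem_cons_of_mem _ hm))
    simp only [List.splitOn, List.splitOnP_cons] at this ⊢
    rw [if_neg (by simp [hx]), this]
    rfl

theorem pvToks_no_sep (l : List Char) (h : ';' ∉ l) :
    pvToks l = if PySem.Chars.strip l ≠ [] then [PySem.Chars.strip l] else [] := by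
  unfold pvToks
  rw [pv_splitOn_no_sep l h]
  by_cases hs : PySem.Chars.strip l = []
  · simp [hs]
  · simp [hs]

-- B's scanner computes exactly A's per-string tokens (for cur containing no ';')
theorem pvScanTokens_spec (l cur : List Char) (hcur : ';' ∉ cur) :
    pvScanTokens l cur = (pvToks (cur.reverse ++ l)).map String.ofList := by
  induction l generalizing cur with
  | nil =>
    rw [pvScanTokens]
    rw [List.append_nil, pvToks_no_sep cur.reverse (by simpa using hcur)]
    by_cases hs : PySem.Chars.strip cur.reverse = []
    · simp [hs]
    · simp [hs]
  | cons ch rest ih =>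
    rw [pvScanTokens]
    by_cases hch : ch = ';'
    · subst hch
      rw [if_pos rfl, pvToks_sep_append, ih [] (by simp),
          pvToks_no_sep cur.reverse (by simpa using hcur)]
      by_cases hs : PySem.Chars.strip cur.reverse = []
      · simp [hs]
      · simp [hs]
    · rw [if_neg hch, ih (ch :: cur) (by
        intro hm
        rcases List.mem_cons.mp hm with h1 | h2
        · exact hch h1.symm
        · exact hcur h2)]
      simp

-- A's fold characterised as a flatten of per-record tokens
theorem pv_A_fold (records : List (List (String × String))) (init : List String) :
    records.foldl (fun keywords r =>
      let k1 := PySem.Dict.getD (PySem.Dict.mk r) "K1" ""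
      if k1 ≠ "" then
        let kws := (((PySem.Chars.splitOn k1.toList [';']).map PySem.Chars.strip).filter
          (fun t => t ≠ [])).map String.ofList
        keywords ++ kws
      else keywords) init
    = init ++ ((records.map (fun r => pvToks (PySem.Dict.getD (PySem.Dict.mk r) "K1" "").toList)).flatten).map String.ofList := by
  induction records generalizing init with
  | nil => simp
  | cons r rs ih =>
    simp only [List.foldl_cons, List.map_cons, List.flatten_cons]
    by_cases hk : PySem.Dict.getD (PySem.Dict.mk r) "K1" "" = ""
    · rw [hk]
      simpa [hk, pvToks_nil] using ih init
    · simp only [ne_eq, hk, not_false_eq_true, if_true, ih]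
      rw [pv_splitOn_eq]
      simp [pvToks, List.append_assoc]

-- B characterised the same way
theorem pv_B_flatten (records : List (List (String × String))) :
    extract_cnki_keywords_alt records
    = ((records.map (fun r => pvToks (PySem.Dict.getD (PySem.Dict.mk r) "K1" "").toList)).flatten).map String.ofList := by
  induction records with
  | nil => rfl
  | cons r rs ih =>
    rw [extract_cnki_keywords_alt, ih, pvScanTokens_spec _ [] (by simp)]
    simp

-- ===== VERDICT (by name: the statement is the Claim_ definition above) =====
theorem extract_cnki_keywords_spec : Claim_equal_extract_cnki_keywords := by
  intro records _
  unfold Spec_extract_cnki_keywords extract_cnki_keywords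
  rw [pv_A_fold records [], pv_B_flatten]
  simp
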